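-- pv_equiv track=rewrite | github.com/wakkpu/algorithm-study | greedy/ATM.py | ATM_problem
-- ===== SOURCE A (Python) =====
-- def ATM_problem(A, X):
--
--     # A: num of people, X: time people need
--     P = X
--     P = sorted(P)
--
--     prefix_time = [0]*A
--
--     for i in range(A):
--         for j in range(0, i+1):
--             prefix_time[i] += P[j]
--
--     solution = 0
--     for i in range(len(prefix_time)):
--         solution += prefix_time[i]
--
--     return solution
-- ===== SOURCE B (Python) =====
-- def ATM_problem(A, X):
--     # Each of the first A sorted times P[i] appears in A - i prefix sums,
--     # so the answer is the weighted sum (A - i) * P[i] over i < A.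
--     P = sorted(X)
--     return sum((A - i) * P[i] for i in range(A))
-- ===== Notes on version B (the rewrite author's own statement) =====
-- stated objective: faster
-- what changed: Replaces the O(A^2) nested recomputation of each prefix sum (plus a separate summing pass) by a single weighted sum: each sorted element P[i] is counted (A - i) times.
import Mathlib
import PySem

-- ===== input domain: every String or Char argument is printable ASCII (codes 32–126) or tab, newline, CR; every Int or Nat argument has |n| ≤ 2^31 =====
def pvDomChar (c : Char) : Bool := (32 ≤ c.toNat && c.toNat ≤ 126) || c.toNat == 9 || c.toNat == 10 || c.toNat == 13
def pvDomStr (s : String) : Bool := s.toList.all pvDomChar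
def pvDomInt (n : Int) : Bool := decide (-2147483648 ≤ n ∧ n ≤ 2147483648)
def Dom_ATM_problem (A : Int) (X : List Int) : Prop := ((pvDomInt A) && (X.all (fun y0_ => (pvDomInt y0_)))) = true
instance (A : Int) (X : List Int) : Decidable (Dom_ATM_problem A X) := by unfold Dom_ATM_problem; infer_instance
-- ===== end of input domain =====

-- ===== PORT A =====
-- B computes the same total as a weighted single sum over the sorted list ((A-i)*P[i])
-- instead of A's nested prefix recomputation; equality proved on A ≤ len(X), where A returns
-- (both Pythons raise IndexError for A > len(X)).
def ATM_problem (A : Int) (X : List Int) : Int :=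
  let P := PySem.List.sorted X (fun x => x) false
  let prefix_time : List Int := List.replicate A.toNat 0   -- [0]*A ([] for A ≤ 0, as in Python)
  let prefix_time := (PySem.List.pyRange 0 A 1).foldl (fun pt i =>
      (PySem.List.pyRange 0 (i + 1) 1).foldl (fun pt j =>
        PySem.List.pySetD pt i (PySem.List.pyGetD pt i 0 + PySem.List.pyGetD P j 0)) pt) prefix_time
  let solution : Int := 0
  let solution := (PySem.List.pyRange 0 (prefix_time.length : Int) 1).foldl
      (fun s i => s + PySem.List.pyGetD prefix_time i 0) solution
  solution

-- ===== PORT B =====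
def ATM_problem_alt (A : Int) (X : List Int) : Int :=
  let P := PySem.List.sorted X (fun x => x) false
  -- sum((A - i) * P[i] for i in range(A)); P[i] in range under Pre_
  (PySem.List.pyRange 0 A 1).foldl (fun s i => s + (A - i) * PySem.List.pyGetD P i 0) 0

-- ===== PRECONDITION & SPEC =====
-- A raises IndexError (P[j] with j < A out of range) exactly when A > len(X); B raises there too.
def Pre_ATM_problem (A : Int) (X : List Int) : Prop := A ≤ (X.length : Int)
instance (A : Int) (X : List Int) : Decidable (Pre_ATM_problem A X) := by
  unfold Pre_ATM_problem; infer_instance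
def pvWitness_ATM_problem : Int × List Int := (2, [3, 1, 2])

def Spec_ATM_problem (A : Int) (X : List Int) (out : Int) : Prop := out = ATM_problem_alt A X
instance (A : Int) (X : List Int) (out : Int) : Decidable (Spec_ATM_problem A X out) := by
  unfold Spec_ATM_problem; infer_instance

-- ===== CLAIM (what is proved, stated in full; the proofs are below) =====
def Claim_equal_ATM_problem : Prop := ∀ (A : Int) (X : List Int), Dom_ATM_problem A X → Pre_ATM_problem A X → Spec_ATM_problem A X (ATM_problem A X)

-- ===== LEMMAS AND PROOFS =====

/-- Sum of the first `m` elements of `P` read through `pyGetD` (A's inner loop total). -/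
def pvS (P : List Int) (m : Nat) : Int :=
  ((List.range m).map (fun j : Nat => PySem.List.pyGetD P (j : Int) 0)).sum

theorem pvS_succ (P : List Int) (m : Nat) :
    pvS P (m + 1) = pvS P m + PySem.List.pyGetD P (m : Int) 0 := by
  simp [pvS, List.range_succ]

/-- A's inner loop: adding `P[0..m)` into slot `i` is a single `set`. -/
theorem pv_inner (P pt : List Int) (i : Int) (m : Nat) (h0 : 0 ≤ i) (h : i.toNat < pt.length) :
    (PySem.List.pyRange 0 (m : Int) 1).foldl
      (fun pt j => PySem.List.pySetD pt i (PySem.List.pyGetD pt i 0 + PySem.List.pyGetD P j 0)) pt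
    = pt.set i.toNat (pt.getD i.toNat 0 + pvS P m) := by
  induction m with
  | zero =>
    rw [show ((0 : Nat) : Int) = 0 from rfl, PySem.List.pyRange_one_eq_nil le_rfl, List.foldl_nil]
    have hp0 : pvS P 0 = 0 := by simp [pvS]
    rw [hp0, add_zero, List.getD_eq_getElem pt 0 h]
    exact (List.set_getElem_self h).symm
  | succ k ih =>
    push_cast
    rw [PySem.List.pyRange_one_succ_right (by positivity), List.foldl_append, ih]
    simp only [List.foldl_cons, List.foldl_nil]
    rw [PySem.List.pySetD_of_nonneg _ _ h0,
      PySem.List.pyGetD_eq_getElem _ _ h0 (by simp only [List.length_set]; omega)]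
    simp only [List.getElem_set_self]
    rw [List.set_set, pvS_succ]
    ring_nf

/-- A's outer loop over `range n` fills slot `i` with `pt[i] + pvS P (i+1)`. -/
theorem pv_outer (P : List Int) (n : Nat) (pt : List Int) (h : n ≤ pt.length) :
    (PySem.List.pyRange 0 (n : Int) 1).foldl
      (fun pt i => (PySem.List.pyRange 0 (i + 1) 1).foldl
        (fun pt j => PySem.List.pySetD pt i (PySem.List.pyGetD pt i 0 + PySem.List.pyGetD P j 0)) pt) pt
    = (List.range n).map (fun i => pt.getD i 0 + pvS P (i + 1)) ++ pt.drop n := by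
  induction n with
  | zero =>
    rw [show ((0 : Nat) : Int) = 0 from rfl, PySem.List.pyRange_one_eq_nil le_rfl]
    simp
  | succ k ih =>
    push_cast
    rw [PySem.List.pyRange_one_succ_right (by positivity), List.foldl_append, ih (by omega)]
    simp only [List.foldl_cons, List.foldl_nil]
    set pt' := (List.range k).map (fun i => pt.getD i 0 + pvS P (i + 1)) ++ pt.drop k with hpt'
    have hlenm : ((List.range k).map (fun i => pt.getD i 0 + pvS P (i + 1))).length = k := by simp
    have hlen' : pt'.length = pt.length := by
      simp only [hpt', List.length_append, List.length_map, List.length_range, List.length_drop]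
      omega
    rw [show ((k : Int) + 1) = ((k + 1 : Nat) : Int) by push_cast; ring,
      pv_inner P pt' (k : Int) (k + 1) (by positivity) (by simp only [Int.toNat_natCast, hlen']; omega)]
    simp only [Int.toNat_natCast]
    have hget : pt'.getD k 0 = pt.getD k 0 := by
      have hle : ((List.range k).map (fun i => pt.getD i 0 + pvS P (i + 1))).length ≤ k := by
        rw [hlenm]
      rw [List.getD_eq_getElem?_getD, List.getD_eq_getElem?_getD, hpt',
        List.getElem?_append_right hle, hlenm, Nat.sub_self, List.getElem?_drop, Nat.add_zero]
    rw [hget]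
    apply List.ext_getElem?
    intro j
    rw [List.getElem?_set]
    by_cases hkj : k = j
    · subst hkj
      rw [if_pos rfl, if_pos (by omega),
        List.getElem?_append_left (by simp), List.getElem?_map,
        List.getElem?_range (by omega)]
      rfl
    · rw [if_neg hkj]
      by_cases hlt : j < k
      · rw [hpt', List.getElem?_append_left (by rw [hlenm]; exact hlt),
          List.getElem?_append_left (by simp; omega), List.getElem?_map, List.getElem?_map,
          List.getElem?_range hlt, List.getElem?_range (by omega)]
      · rw [hpt', List.getElem?_append_right (by rw [hlenm]; omega), hlenm,
          List.getElem?_append_right (by simp; omega), List.getElem?_drop, List.getElem?_drop]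
        simp only [List.length_map, List.length_range]
        congr 1
        omega

/-- A left fold adding `f i` per element is the sum of the mapped list. -/
theorem pv_foldl_sum (l : List Int) (f : Int → Int) (init : Int) :
    l.foldl (fun s i => s + f i) init = init + (l.map f).sum := by
  induction l generalizing init with
  | nil => simp
  | cons x xs ih => simp [ih]; ring

/-- Key identity: the sum of the first-(i+1) prefix sums over i < n equals the
    weighted sum ∑_{k<n} (n-k)·P[k]. -/
theorem pv_key (P : List Int) (n : Nat) :
    ((List.range n).map (fun i : Nat => pvS P (i + 1))).sum
    = ((List.range n).map (fun k : Nat => ((n : Int) - (k : Int)) * PySem.List.pyGetD P (k : Int) 0)).sum := by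
  induction n with
  | zero => simp
  | succ m ih =>
    rw [List.range_succ]
    simp only [List.map_append, List.sum_append, List.map_cons, List.map_nil, List.sum_cons,
      List.sum_nil, add_zero, ih]
    push_cast
    have hsum : ∀ (f g : Nat → Int) (l : List Nat),
        (l.map (fun k => f k + g k)).sum = (l.map f).sum + (l.map g).sum := by
      intro f g l
      induction l with
      | nil => simp
      | cons a t iht => simp only [List.map_cons, List.sum_cons, iht]; ring
    have hstep : (List.map (fun k : Nat => ((m : Int) + 1 - (k : Int)) * PySem.List.pyGetD P (k : Int) 0) (List.range m)).sum
        = (List.map (fun k : Nat => ((m : Int) - (k : Int)) * PySem.List.pyGetD P (k : Int) 0) (List.range m)).sum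
          + (List.map (fun k : Nat => PySem.List.pyGetD P (k : Int) 0) (List.range m)).sum := by
      rw [← hsum
        (fun k : Nat => ((m : Int) - (k : Int)) * PySem.List.pyGetD P (k : Int) 0)
        (fun k : Nat => PySem.List.pyGetD P (k : Int) 0)]
      apply congrArg
      apply List.map_congr_left
      intro k _
      ring
    rw [hstep, pvS_succ,
      show (List.map (fun k : Nat => PySem.List.pyGetD P (k : Int) 0) (List.range m)).sum
        = pvS P m by simp only [pvS]]
    ring

theorem pv_main (A : Int) (X : List Int) (_h : A ≤ (X.length : Int)) :
    ATM_problem A X = ATM_problem_alt A X := by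
  simp only [ATM_problem, ATM_problem_alt]
  by_cases hA : A ≤ 0
  · have h1 : A.toNat = 0 := Int.toNat_of_nonpos hA
    rw [PySem.List.pyRange_one_eq_nil hA]
    simp [h1]
  · push_neg at hA
    have h0A : (0 : Int) ≤ A := le_of_lt hA
    set P := PySem.List.sorted X (fun x => x) false with hP
    set n := A.toNat with hn
    have hnA : (n : Int) = A := Int.toNat_of_nonneg h0A
    rw [← hnA, pv_outer P n (List.replicate n 0) (by simp)]
    have hrep : ∀ i : Nat, (List.replicate n (0 : Int)).getD i 0 = 0 := by
      intro i
      rw [List.getD_eq_getElem?_getD, List.getElem?_replicate]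
      split_ifs <;> rfl
    simp only [hrep, zero_add, List.drop_replicate, Nat.sub_self, List.replicate_zero,
      List.append_nil]
    rw [pv_foldl_sum (PySem.List.pyRange 0 (n : Int) 1)
      (fun i => ((n : Int) - i) * PySem.List.pyGetD P i 0) 0]
    rw [PySem.List.foldl_pyRange_zero_pyGetD']
    have hfold : ∀ l : List Int, l.foldl (fun s x => s + x) (0 : Int) = l.sum := by
      intro l; rw [List.sum_eq_foldl]
    rw [hfold, zero_add, PySem.List.pyRange_zero_natCast, List.map_map]
    exact pv_key P n

-- ===== VERDICT (by name: the statement is the Claim_ definition above) =====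
theorem ATM_problem_spec : Claim_equal_ATM_problem := by
  intro A X _ hpre
  unfold Spec_ATM_problem
  exact pv_main A X hpre
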